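-- pv_equiv track=rewrite | github.com/zxc67373/zhihu-cli | zhihu_cli/auth.py | _render_qr_half_blocks
-- ===== SOURCE A (Python) =====
-- def _render_qr_half_blocks(matrix: list[list[bool]]) -> str:
--     """Render QR matrix using half-block characters (▀▄█)."""
--     if not matrix:
--         return ""
--
--     border = 2
--     width = len(matrix[0]) + border * 2
--     padded = [[False] * width for _ in range(border)]
--     for row in matrix:
--         padded.append(([False] * border) + row + ([False] * border))
--     padded.extend([[False] * width for _ in range(border)])
--
--     chars = {
--         (False, False): " ",
--         (True, False): "▀",
--         (False, True): "▄",
--         (True, True): "█",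
--     }
--
--     lines = []
--     for y in range(0, len(padded), 2):
--         top = padded[y]
--         bottom = padded[y + 1] if y + 1 < len(padded) else [False] * width
--         line = "".join(chars[(top[x], bottom[x])] for x in range(width))
--         lines.append(line)
--     return "\n".join(lines)
-- ===== SOURCE B (Python) =====
-- def _render_qr_half_blocks(matrix: list[list[bool]]) -> str:
--     """Render QR matrix using half-block characters, consuming the matrix two rows
--     at a time instead of building a padded copy."""
--     if not matrix:
--         return ""
--
--     w = len(matrix[0])
--     blank = " " * (w + 4)
--
--     def cell(row, x):
--         return row[x] if x < len(row) else False
--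
--     def glyph(t, b):
--         if t and b:
--             return "\u2588"
--         if t:
--             return "\u2580"
--         if b:
--             return "\u2584"
--         return " "
--
--     lines = [blank]
--     rows = matrix
--     while rows:
--         top = rows[0]
--         bottom = rows[1] if len(rows) > 1 else []
--         lines.append("  " + "".join(glyph(cell(top, x), cell(bottom, x))
--                                     for x in range(w + 2)))
--         rows = rows[2:]
--     lines.append(blank)
--     return "\n".join(lines)
-- ===== Notes on version B (the rewrite author's own statement) =====
-- stated objective: alternative
-- what changed: B replaces A's padded-matrix construction and index loop over the padded grid by a direct pairwise consumption of the matrix rows: it emits a literal blank border line, then takes rows two at a time (bottom = [] for an odd leftover) building each line from a per-row bounds-checked cell read and an if-chain glyph, then a final blank line.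
import Mathlib
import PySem

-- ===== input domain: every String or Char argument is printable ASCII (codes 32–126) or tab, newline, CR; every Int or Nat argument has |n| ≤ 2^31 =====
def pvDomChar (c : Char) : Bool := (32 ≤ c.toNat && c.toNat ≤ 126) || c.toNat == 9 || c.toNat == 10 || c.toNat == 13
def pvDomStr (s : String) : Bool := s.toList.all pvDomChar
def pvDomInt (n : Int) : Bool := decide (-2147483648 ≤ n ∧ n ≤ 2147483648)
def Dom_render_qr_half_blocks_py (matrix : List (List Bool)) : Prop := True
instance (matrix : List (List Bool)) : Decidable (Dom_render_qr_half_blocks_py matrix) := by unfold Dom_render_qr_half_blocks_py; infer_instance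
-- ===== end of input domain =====

-- B replaces A's padded-matrix construction and index loop over the padded grid by a
-- pairwise consumption of the matrix rows themselves (objective: alternative decomposition).
-- Pre_ excludes ragged matrices with a row shorter than the first row, where Python A
-- raises IndexError.

-- the four-entry chars dict of Python A, as a total lookup (keys are all Bool pairs)
def pvHalfChar (t b : Bool) : Char :=
  match t, b with
  | false, false => ' '
  | true,  false => '▀'
  | false, true  => '▄'
  | true,  true  => '█'

-- ===== PORT A =====
def render_qr_half_blocks_py (matrix : List (List Bool)) : String :=
  if matrix = [] then "" else
    let border := 2
    let width := (matrix.headD []).length + border * 2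
    let padded : List (List Bool) :=
      List.replicate border (List.replicate width false)
        ++ matrix.map (fun row => List.replicate border false ++ row ++ List.replicate border false)
        ++ List.replicate border (List.replicate width false)
    -- range(0, len(padded), 2): y = 2*i for i < ceil(len/2); top[x] is in range on Pre_
    let lines := (List.range ((padded.length + 1) / 2)).map (fun i =>
      let y := 2 * i
      let top := padded.getD y []
      let bottom := if y + 1 < padded.length then padded.getD (y + 1) [] else List.replicate width false
      String.ofList ((List.range width).map (fun x => pvHalfChar (top.getD x false) (bottom.getD x false))))
    PySem.Str.join "\n" lines

-- ===== PORT B =====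
-- cell(row, x): row[x] if x < len(row) else False
def pvCellB (row : List Bool) (x : Nat) : Bool :=
  if x < row.length then row.getD x false else false

-- glyph(t, b): the if-chain of Source B
def pvGlyph (t b : Bool) : Char :=
  if t && b then '█' else if t then '▀' else if b then '▄' else ' '

-- the while loop of Source B: consume the rows two at a time (bottom = [] for an odd leftover)
def pvPairLines (w : Nat) : List (List Bool) → List String
  | [] => []
  | [top] =>
      [String.ofList (List.replicate 2 ' '
        ++ (List.range (w + 2)).map (fun x => pvGlyph (pvCellB top x) (pvCellB [] x)))]
  | top :: bottom :: rest =>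
      String.ofList (List.replicate 2 ' '
        ++ (List.range (w + 2)).map (fun x => pvGlyph (pvCellB top x) (pvCellB bottom x)))
      :: pvPairLines w rest

def render_qr_half_blocks_py_alt (matrix : List (List Bool)) : String :=
  if matrix = [] then "" else
    let w := (matrix.headD []).length
    let blank := String.ofList (List.replicate (w + 4) ' ')
    PySem.Str.join "\n" (blank :: (pvPairLines w matrix ++ [blank]))

-- ===== PRECONDITION & SPEC =====
-- Pre_ excludes exactly the ragged inputs (some row shorter than the first row) on which
-- Python A raises IndexError when reading top[x] up to the first row's padded width.
def Pre_render_qr_half_blocks_py (matrix : List (List Bool)) : Prop :=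
  ∀ row ∈ matrix, (matrix.headD []).length ≤ row.length
instance (matrix : List (List Bool)) : Decidable (Pre_render_qr_half_blocks_py matrix) := by
  unfold Pre_render_qr_half_blocks_py; infer_instance

def pvWitness_render_qr_half_blocks_py : List (List Bool) := [[true, false], [false, true]]

def Spec_render_qr_half_blocks_py (matrix : List (List Bool)) (out : String) : Prop :=
  out = render_qr_half_blocks_py_alt matrix
instance (matrix : List (List Bool)) (out : String) : Decidable (Spec_render_qr_half_blocks_py matrix out) := by
  unfold Spec_render_qr_half_blocks_py; infer_instance

-- ===== CLAIM (what is proved, stated in full; the proofs are below) =====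
def Claim_equal_render_qr_half_blocks_py : Prop := ∀ (matrix : List (List Bool)), Dom_render_qr_half_blocks_py matrix → Pre_render_qr_half_blocks_py matrix → Spec_render_qr_half_blocks_py matrix (render_qr_half_blocks_py matrix)

-- ===== LEMMAS AND PROOFS =====

-- proof-side bridge: the padded cell at (r, x), bounds-checked against the original matrix
def pvGetCell (matrix : List (List Bool)) (r c : Nat) : Bool :=
  if 2 ≤ r ∧ r - 2 < matrix.length ∧ 2 ≤ c ∧ c - 2 < (matrix.getD (r - 2) []).length then
    (matrix.getD (r - 2) []).getD (c - 2) false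
  else false

-- proof-side common form: A's grid walk expressed through pvGetCell
def pvGForm (matrix : List (List Bool)) : String :=
  if matrix = [] then "" else
    let width := (matrix.headD []).length + 4
    PySem.Str.join "\n" ((List.range ((matrix.length + 4 + 1) / 2)).map (fun i =>
      String.ofList ((List.range width).map (fun x =>
        pvHalfChar (pvGetCell matrix (2 * i) x) (pvGetCell matrix (2 * i + 1) x)))))

-- A's padded cell read (defaulting to False out of range) equals pvGetCell, at every position.
lemma padded_cell_eq (matrix : List (List Bool)) (r x : Nat) :
    ((if r < matrix.length + 4 then
        (List.replicate 2 (List.replicate ((matrix.headD []).length + 4) false)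
          ++ matrix.map (fun row => List.replicate 2 false ++ row ++ List.replicate 2 false)
          ++ List.replicate 2 (List.replicate ((matrix.headD []).length + 4) false)).getD r []
      else List.replicate ((matrix.headD []).length + 4) false).getD x false)
      = pvGetCell matrix r x := by
  have hrep : ∀ (m k : Nat), (List.replicate m false).getD k false = false := by
    intro m k
    simp only [List.getD_eq_getElem?_getD, List.getElem?_replicate]
    split <;> rfl
  have hrep2 : ∀ (z : List Bool) (k : Nat), k < 2 → (List.replicate 2 z).getD k [] = z := by
    intro z k hk
    interval_cases k <;> rfl
  rw [List.append_assoc]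
  by_cases hr4 : r < matrix.length + 4
  · rw [if_pos hr4]
    by_cases hr2 : r < 2
    · rw [List.getD_append _ _ _ _ (by simp; omega), hrep2 _ _ hr2, hrep]
      unfold pvGetCell
      rw [if_neg (by omega)]
    · rw [List.getD_append_right _ _ _ _ (by simp; omega)]
      have hidx : r - (List.replicate 2 (List.replicate ((matrix.headD []).length + 4) false)).length = r - 2 := by simp
      rw [hidx]
      by_cases hrL : r - 2 < matrix.length
      · rw [List.getD_append _ _ _ _ (by simp; omega)]
        have hget : (matrix.map (fun row => List.replicate 2 false ++ row ++ List.replicate 2 false)).getD (r - 2) []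
            = List.replicate 2 false ++ matrix.getD (r - 2) [] ++ List.replicate 2 false := by
          rw [List.getD_eq_getElem _ _ (by simpa using hrL), List.getD_eq_getElem _ _ hrL, List.getElem_map]
        rw [hget, List.append_assoc]
        by_cases hx2 : x < 2
        · rw [List.getD_append _ _ _ _ (by simp; omega), hrep]
          unfold pvGetCell
          rw [if_neg (by omega)]
        · rw [List.getD_append_right _ _ _ _ (by simp; omega)]
          have hidx2 : x - (List.replicate 2 false : List Bool).length = x - 2 := by simp
          rw [hidx2]
          by_cases hxr : x - 2 < (matrix.getD (r - 2) []).length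
          · rw [List.getD_append _ _ _ _ hxr]
            unfold pvGetCell
            rw [if_pos ⟨by omega, by omega, by omega, hxr⟩]
          · rw [List.getD_append_right _ _ _ _ (by omega), hrep]
            unfold pvGetCell
            rw [if_neg (by omega)]
      · rw [List.getD_append_right _ _ _ _ (by simp; omega)]
        have hidx3 : r - 2 - (matrix.map (fun row => List.replicate 2 false ++ row ++ List.replicate 2 false)).length = r - 2 - matrix.length := by simp
        rw [hidx3, hrep2 _ _ (by omega), hrep]
        unfold pvGetCell
        rw [if_neg (by omega)]
  · rw [if_neg hr4, hrep]
    unfold pvGetCell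
    rw [if_neg (by omega)]

-- A equals the common grid form
lemma a_eq_gform (matrix : List (List Bool)) :
    render_qr_half_blocks_py matrix = pvGForm matrix := by
  unfold render_qr_half_blocks_py pvGForm
  by_cases hnil : matrix = []
  · simp [hnil]
  · simp only [if_neg hnil]
    congr 1
    have hlen : (List.replicate 2 (List.replicate ((matrix.headD []).length + 2 * 2) false)
        ++ matrix.map (fun row => List.replicate 2 false ++ row ++ List.replicate 2 false)
        ++ List.replicate 2 (List.replicate ((matrix.headD []).length + 2 * 2) false)).length
        = matrix.length + 4 := by simp
    rw [hlen]
    apply List.map_congr_left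
    intro i hi
    rw [List.mem_range] at hi
    congr 1
    apply List.map_congr_left
    intro x hx
    rw [List.mem_range] at hx
    have h24 : (matrix.headD []).length + 2 * 2 = (matrix.headD []).length + 4 := by omega
    rw [h24]
    have htop := padded_cell_eq matrix (2 * i) x
    rw [if_pos (by omega)] at htop
    have hbot := padded_cell_eq matrix (2 * i + 1) x
    rw [htop, hbot]

-- glyph if-chain = chars dict
lemma glyph_eq_halfChar : ∀ t b : Bool, pvGlyph t b = pvHalfChar t b := by decide

-- pvGetCell ignores the first two rows of matrix pairs
lemma getCell_shift (a b : List Bool) (rest : List (List Bool)) (r x : Nat) (hr : 2 ≤ r) :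
    pvGetCell (a :: b :: rest) (r + 2) x = pvGetCell rest r x := by
  unfold pvGetCell
  have h1 : (a :: b :: rest).getD (r + 2 - 2) [] = rest.getD (r - 2) [] := by
    have : r + 2 - 2 = (r - 2) + 2 := by omega
    rw [this]; rfl
  rw [h1]
  simp only [List.length_cons]
  split_ifs with hA hB hB
  · rfl
  · exfalso; omega
  · exfalso; omega
  · rfl

-- pvGetCell below the top border is False
lemma getCell_top (m : List (List Bool)) (r x : Nat) (hr : r < 2) :
    pvGetCell m r x = false := by
  unfold pvGetCell; rw [if_neg (by omega)]

-- pvGetCell below the bottom border is False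
lemma getCell_bot (m : List (List Bool)) (r x : Nat) (hr : m.length + 2 ≤ r) :
    pvGetCell m r x = false := by
  unfold pvGetCell; rw [if_neg (by omega)]

-- a padded cell right of the left border is B's per-row bounds-checked read
lemma getCell_plus2 (m : List (List Bool)) (r x : Nat) (hr : 2 ≤ r) :
    pvGetCell m r (x + 2) = pvCellB (m.getD (r - 2) []) x := by
  unfold pvGetCell pvCellB
  rw [show x + 2 - 2 = x by omega]
  by_cases hm : r - 2 < m.length
  · split_ifs with hA hB hB
    · rfl
    · exfalso; omega
    · exfalso; omega
    · rfl
  · have hget : m.getD (r - 2) [] = [] := by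
      rw [List.getD_eq_getElem?_getD, List.getElem?_eq_none (by omega : m.length ≤ r - 2)]
      rfl
    rw [hget]
    simp

-- left-border columns are False
lemma getCell_left (m : List (List Bool)) (r c : Nat) (hc : c < 2) :
    pvGetCell m r c = false := by
  unfold pvGetCell; rw [if_neg (by omega)]

-- one output line of the grid form, split into border + interior
lemma line_split (m : List (List Bool)) (k w : Nat) :
    (List.range (w + 4)).map (fun x =>
        pvHalfChar (pvGetCell m (2 * k + 2) x) (pvGetCell m (2 * k + 3) x))
      = List.replicate 2 ' '
        ++ (List.range (w + 2)).map (fun x =>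
            pvGlyph (pvCellB (m.getD (2 * k) []) x) (pvCellB (m.getD (2 * k + 1) []) x)) := by
  rw [show w + 4 = 2 + (w + 2) by omega, List.range_add, List.map_append, List.map_map]
  congr 1
  · rw [show List.range 2 = [0, 1] from rfl]
    simp only [List.map_cons, List.map_nil,
      getCell_left m (2 * k + 2) 0 (by omega), getCell_left m (2 * k + 3) 0 (by omega),
      getCell_left m (2 * k + 2) 1 (by omega), getCell_left m (2 * k + 3) 1 (by omega)]
    rfl
  · apply List.map_congr_left
    intro x _
    simp only [Function.comp_apply]
    rw [show 2 + x = x + 2 by omega,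
      getCell_plus2 m (2 * k + 2) x (by omega), getCell_plus2 m (2 * k + 3) x (by omega),
      glyph_eq_halfChar, show 2 * k + 2 - 2 = 2 * k by omega, show 2 * k + 3 - 2 = 2 * k + 1 by omega]

-- two-step list induction
lemma two_step {α : Type} (P : List α → Prop) (h0 : P []) (h1 : ∀ a, P [a])
    (h2 : ∀ a b l, P l → P (a :: b :: l)) : ∀ l, P l := by
  intro l
  have key : ∀ n (l : List α), l.length ≤ n → P l := by
    intro n
    induction n with
    | zero =>
      intro l hl
      match l with
      | [] => exact h0
      | a :: t => simp at hl
    | succ n ih =>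
      intro l hl
      match l with
      | [] => exact h0
      | [a] => exact h1 a
      | a :: b :: rest =>
        apply h2
        apply ih
        simp only [List.length_cons] at hl
        omega
  exact key l.length l le_rfl

-- the interior pairs of the grid form are exactly B's pairwise loop
lemma pairlines_eq (w : Nat) : ∀ (m : List (List Bool)),
    (List.range ((m.length + 1) / 2)).map (fun k =>
        String.ofList ((List.range (w + 4)).map (fun x =>
          pvHalfChar (pvGetCell m (2 * k + 2) x) (pvGetCell m (2 * k + 3) x))))
      = pvPairLines w m := by
  apply two_step
  · simp [pvPairLines]
  · intro a
    rw [show List.length [a] = 1 from rfl, show ((1 : Nat) + 1) / 2 = 1 from rfl,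
      show List.range 1 = [0] from rfl]
    simp only [List.map_singleton]
    rw [line_split [a] 0 w]
    rfl
  · intro a b rest ih
    have hlen : ((a :: b :: rest).length + 1) / 2 = (rest.length + 1) / 2 + 1 := by
      simp only [List.length_cons]; omega
    rw [hlen, show List.range ((rest.length + 1) / 2 + 1)
        = 0 :: List.map Nat.succ (List.range ((rest.length + 1) / 2)) from List.range_succ_eq_map]
    simp only [List.map_cons, List.map_map]
    unfold pvPairLines
    congr 1
    · rw [line_split (a :: b :: rest) 0 w]
      rfl
    · rw [← ih]
      apply List.map_congr_left
      intro k _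
      simp only [Function.comp_apply, Nat.succ_eq_add_one]
      rw [show 2 * (k + 1) + 2 = (2 * k + 2) + 2 by ring,
        show 2 * (k + 1) + 3 = (2 * k + 3) + 2 by ring]
      congr 1
      apply List.map_congr_left
      intro x _
      rw [getCell_shift a b rest (2 * k + 2) x (by omega),
        getCell_shift a b rest (2 * k + 3) x (by omega)]

-- B equals the common grid form
lemma b_eq_gform (matrix : List (List Bool)) :
    render_qr_half_blocks_py_alt matrix = pvGForm matrix := by
  unfold render_qr_half_blocks_py_alt pvGForm
  by_cases hnil : matrix = []
  · simp [hnil]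
  · simp only [if_neg hnil]
    congr 1
    have hblank : ∀ r : Nat, (∀ x, pvGetCell matrix (2 * r) x = false) →
        (∀ x, pvGetCell matrix (2 * r + 1) x = false) →
        String.ofList ((List.range ((matrix.headD []).length + 4)).map (fun x =>
          pvHalfChar (pvGetCell matrix (2 * r) x) (pvGetCell matrix (2 * r + 1) x)))
        = String.ofList (List.replicate ((matrix.headD []).length + 4) ' ') := by
      intro r h1 h2
      congr 1
      rw [List.eq_replicate_iff]
      refine ⟨by simp, ?_⟩
      intro c hc
      rw [List.mem_map] at hc
      obtain ⟨x, _, hx⟩ := hc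
      rw [h1 x, h2 x] at hx
      exact hx.symm
    rw [show (matrix.length + 4 + 1) / 2 = ((matrix.length + 1) / 2 + 1) + 1 by omega,
      show List.range ((matrix.length + 1) / 2 + 1 + 1)
        = List.range ((matrix.length + 1) / 2 + 1) ++ [(matrix.length + 1) / 2 + 1] from List.range_succ,
      show List.range ((matrix.length + 1) / 2 + 1)
        = 0 :: List.map Nat.succ (List.range ((matrix.length + 1) / 2)) from List.range_succ_eq_map]
    simp only [List.map_append, List.map_cons, List.map_map]
    congr 1
    · exact (hblank 0 (fun x => getCell_top _ _ _ (by omega))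
        (fun x => getCell_top _ _ _ (by omega))).symm
    congr 1
    · rw [← pairlines_eq (matrix.headD []).length matrix]
      apply List.map_congr_left
      intro k _
      simp only [Function.comp_apply, Nat.succ_eq_add_one]
      rw [show 2 * (k + 1) + 1 = 2 * k + 3 by ring, show 2 * (k + 1) = 2 * k + 2 by ring]
    · exact congrArg (fun s => [s]) (hblank ((matrix.length + 1) / 2 + 1)
        (fun x => getCell_bot _ _ _ (by omega))
        (fun x => getCell_bot _ _ _ (by omega))).symm

-- ===== VERDICT (by name: the statement is the Claim_ definition above) =====
theorem render_qr_half_blocks_py_spec : Claim_equal_render_qr_half_blocks_py := by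
  intro matrix _ _
  unfold Spec_render_qr_half_blocks_py
  rw [a_eq_gform, b_eq_gform]
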